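-- pv_equiv track=rewrite | github.com/thoonk/Algorithm | Baekjoon/Python/BOJ_PS/Implementation/Q3085-CandyGame.py | count_edible
-- ===== SOURCE A (Python) =====
-- def count_edible(candies, n):
--     max_count = 1
--
--     for i in range(n):
--         count = 1
--         for j in range(1, n):
--             if candies[i][j] == candies[i][j-1]:
--                 count += 1
--             else:
--                 count = 1
--
--             if max_count < count:
--                 max_count = count
--
--         count = 1
--
--         for j in range(1, n):
--             if candies[j-1][i] == candies[j][i]:
--                 count += 1
--             else:
--                 count = 1
--             if max_count < count:
--                 max_count = count
--
--     return max_count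
-- ===== SOURCE B (Python) =====
-- def count_edible(candies, n):
--     # Slice the n x n grid, transpose it, and scan each line run-by-run
--     # (jumping over each maximal run) instead of a counter reset at every cell.
--     grid = [candies[i][:n] for i in range(n)]
--     lines = grid + [list(col) for col in zip(*grid)]
--     best = 1
--     for line in lines:
--         while line:
--             k = 1
--             while k < len(line) and line[k] == line[0]:
--                 k += 1
--             if k > best:
--                 best = k
--             line = line[k:]
--     return best
-- ===== Notes on version B (the rewrite author's own statement) =====
-- stated objective: alternative
-- what changed: B slices the n*n grid once, transposes it via zip(*grid), and scans each row/column line run-by-run (jumping a whole maximal run at a time) instead of A's double-indexed per-cell counter resets over candies[i][j]/candies[j][i].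
-- outside the precondition, e.g. on count_edible([], 1): A returns 1, B raises IndexError; on count_edible([[]], 1): A returns 1, B returns 1
import Mathlib
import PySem

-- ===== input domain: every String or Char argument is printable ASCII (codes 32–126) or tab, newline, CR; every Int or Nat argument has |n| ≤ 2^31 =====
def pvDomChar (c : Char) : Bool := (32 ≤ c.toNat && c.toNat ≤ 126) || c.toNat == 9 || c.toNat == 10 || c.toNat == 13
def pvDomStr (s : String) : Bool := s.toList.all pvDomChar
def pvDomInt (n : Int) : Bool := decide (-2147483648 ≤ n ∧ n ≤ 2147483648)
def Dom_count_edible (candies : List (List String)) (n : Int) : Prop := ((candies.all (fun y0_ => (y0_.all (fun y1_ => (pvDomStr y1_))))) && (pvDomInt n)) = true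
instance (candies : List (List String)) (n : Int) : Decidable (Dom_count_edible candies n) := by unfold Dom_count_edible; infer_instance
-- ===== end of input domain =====

-- B re-implements the scan: slice the n×n grid, transpose it, and take the max
-- over maximal runs of each row/column (run-jumping) instead of A's per-cell
-- counter resets driven by double indexing; equal return value on Pre_ (alternative decomposition, no speed claim).

-- ===== PORT A =====
-- candies[i] / row[j]; the defaults are unreachable under Pre_count_edible (Python raises IndexError there)
def pvGetRow (candies : List (List String)) (i : Int) : List String :=
  (PySem.List.pyGet? candies i).getD []
def pvGetCell (row : List String) (j : Int) : String :=
  (PySem.List.pyGet? row j).getD ""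

def count_edible (candies : List (List String)) (n : Int) : Int :=
  (PySem.List.pyRange 0 n 1).foldl (fun max_count i =>
    let s1 := (PySem.List.pyRange 1 n 1).foldl (fun (s : Int × Int) j =>
      let count := if pvGetCell (pvGetRow candies i) j == pvGetCell (pvGetRow candies i) (j-1) then s.1 + 1 else 1
      (count, if s.2 < count then count else s.2)) (1, max_count)
    let s2 := (PySem.List.pyRange 1 n 1).foldl (fun (s : Int × Int) j =>
      let count := if pvGetCell (pvGetRow candies (j-1)) i == pvGetCell (pvGetRow candies j) i then s.1 + 1 else 1
      (count, if s.2 < count then count else s.2)) (1, s1.2)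
    s2.2) 1

-- ===== PORT B =====
-- length of the equal-prefix of `rest` matching x (Source B's inner `while k < len(line) and line[k] == line[0]`, k = this + 1)
def altRunLen (x : String) : List String → Nat
  | [] => 0
  | y :: ys => if y == x then altRunLen x ys + 1 else 0

-- Source B's `while line:` loop: jump over one maximal run at a time
def altLineMax (best : Int) : List String → Int
  | [] => best
  | x :: rest =>
    let k : Int := (altRunLen x rest : Int) + 1
    altLineMax (if k > best then k else best) (rest.drop (altRunLen x rest))
termination_by line => line.length
decreasing_by simp only [List.length_cons, List.length_drop]; omega

-- zip(*rows): truncates at the first exhausted row; fuel = first row's length bounds the output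
def pyZipStarGo : Nat → List (List String) → List (List String)
  | 0, _ => []
  | fuel+1, rows =>
    if rows.isEmpty || rows.any (·.isEmpty) then []
    else rows.map (fun r => r.headI) :: pyZipStarGo fuel (rows.map (·.tail))

def pyZipStar (rows : List (List String)) : List (List String) :=
  pyZipStarGo (match rows with | [] => 0 | r :: _ => r.length) rows

def count_edible_alt (candies : List (List String)) (n : Int) : Int :=
  let grid := (PySem.List.pyRange 0 n 1).map (fun i => PySem.List.slice (pvGetRow candies i) none (some n))
  let lines := grid ++ pyZipStar grid
  lines.foldl altLineMax 1

-- ===== PRECONDITION & SPEC =====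
-- Pre_ excludes the inputs where A raises IndexError: fewer than n rows, or one of the
-- first n rows shorter than n.  (For n = 1 A never indexes and returns 1 even on a too-short
-- grid; B raises on ([], 1) and agrees on the remaining excluded n = 1 corners — see cites.)
def Pre_count_edible (candies : List (List String)) (n : Int) : Prop :=
  n ≤ (candies.length : Int) ∧ ∀ row ∈ candies.take n.toNat, n ≤ (row.length : Int)
instance (candies : List (List String)) (n : Int) : Decidable (Pre_count_edible candies n) := by
  unfold Pre_count_edible; infer_instance

def pvWitness_count_edible : List (List String) × Int := ([["a","a"],["b","a"]], 2)

def Spec_count_edible (candies : List (List String)) (n : Int) (out : Int) : Prop := out = count_edible_alt candies n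
instance (candies : List (List String)) (n : Int) (out : Int) : Decidable (Spec_count_edible candies n out) := by unfold Spec_count_edible; infer_instance

-- ===== CLAIM (what is proved, stated in full; the proofs are below) =====
def Claim_equal_count_edible : Prop := ∀ (candies : List (List String)) (n : Int), Dom_count_edible candies n → Pre_count_edible candies n → Spec_count_edible candies n (count_edible candies n)

-- ===== LEMMAS AND PROOFS =====

-- max run length of a line, by the same run-jumping decomposition (0 on the empty line)
def pvS : List String → Int
  | [] => 0
  | x :: rest => max ((altRunLen x rest : Int) + 1) (pvS (rest.drop (altRunLen x rest)))
termination_by line => line.length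
decreasing_by simp only [List.length_cons, List.length_drop]; omega

-- A's row i / column i, restricted to the n×n grid
def pvRowl (candies : List (List String)) (n i : Int) : List String :=
  (pvGetRow candies i).take n.toNat
def pvColl (candies : List (List String)) (n i : Int) : List String :=
  (candies.take n.toNat).map (fun r => pvGetCell r i)

lemma altLineMax_eq (l : List String) : ∀ (b : Int), 0 ≤ b → altLineMax b l = max b (pvS l) := by
  induction l using pvS.induct with
  | case1 => intro b hb; simp [altLineMax, pvS]; omega
  | case2 x rest ih =>
    intro b hb
    rw [altLineMax, pvS, ih _ (by positivity)]
    omega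

lemma foldl_altLineMax (lines : List (List String)) : ∀ (b : Int), 1 ≤ b →
    lines.foldl altLineMax b = lines.foldl (fun b l => max b (pvS l)) b := by
  induction lines with
  | nil => intro b hb; rfl
  | cons l ls ih =>
    intro b hb
    simp only [List.foldl_cons]
    rw [altLineMax_eq l b (by omega), ih _ (by omega)]

-- A's inner loop as a structural scan over the line's tail
def pvScanP (prev : String) (s : Int × Int) : List String → Int × Int
  | [] => s
  | x :: xs =>
    let c := if x == prev then s.1 + 1 else 1
    pvScanP x (c, if s.2 < c then c else s.2) xs

lemma scanP_snd (xs : List String) : ∀ (prev : String) (c m : Int), 1 ≤ c → c ≤ m →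
    (pvScanP prev (c, m) xs).2
      = max m (max (c + (altRunLen prev xs : Int)) (pvS (xs.drop (altRunLen prev xs)))) := by
  induction xs with
  | nil => intro prev c m h1 h2; simp [pvScanP, altRunLen, pvS]; omega
  | cons x xs ih =>
    intro prev c m h1 h2
    by_cases hxe : x = prev
    · rw [pvScanP]
      simp only [hxe, beq_self_eq_true, if_true]
      rw [ih prev (c+1) (if m < c + 1 then c + 1 else m) (by omega)
        (by by_cases h : m < c + 1 <;> simp [h]; omega)]
      rw [altRunLen]
      simp only [beq_self_eq_true, if_true, List.drop_succ_cons]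
      push_cast
      by_cases h : m < c + 1 <;> simp [h] <;> omega
    · rw [pvScanP]
      simp only [beq_iff_eq, hxe, if_false]
      rw [ih x 1 (if m < 1 then 1 else m) (by omega) (by by_cases h : m < 1 <;> simp [h]; omega)]
      rw [altRunLen]
      simp only [beq_iff_eq, hxe, if_false, Nat.cast_zero, List.drop_zero]
      rw [pvS]
      by_cases h : m < 1 <;> simp [h] <;> omega

-- A's fold over range(a, b) with accessor Acc is pvScanP over the mapped list
lemma foldl_scanP_aux (Acc : Int → String) (b : Int) : ∀ (k : Nat) (a : Int), (b - a).toNat ≤ k →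
    ∀ (s : Int × Int),
    (PySem.List.pyRange a b 1).foldl (fun (s : Int × Int) j =>
        let count := if Acc j == Acc (j-1) then s.1 + 1 else 1
        (count, if s.2 < count then count else s.2)) s
      = pvScanP (Acc (a-1)) s ((PySem.List.pyRange a b 1).map Acc) := by
  intro k
  induction k with
  | zero =>
    intro a ha s
    rw [PySem.List.pyRange_one_eq_nil (by omega)]
    simp [pvScanP]
  | succ k ihk =>
    intro a ha s
    by_cases hab : a < b
    · rw [PySem.List.pyRange_one_cons hab]
      simp only [List.foldl_cons, List.map_cons]
      rw [pvScanP]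
      rw [ihk (a+1) (by omega)]
      simp only [add_sub_cancel_right]
    · rw [PySem.List.pyRange_one_eq_nil (by omega)]
      simp [pvScanP]

lemma foldl_scanP (Acc : Int → String) (b a : Int) (s : Int × Int) :
    (PySem.List.pyRange a b 1).foldl (fun (s : Int × Int) j =>
        let count := if Acc j == Acc (j-1) then s.1 + 1 else 1
        (count, if s.2 < count then count else s.2)) s
      = pvScanP (Acc (a-1)) s ((PySem.List.pyRange a b 1).map Acc) :=
  foldl_scanP_aux Acc b (b - a).toNat a le_rfl s

lemma beq_swap (a b : String) : (a == b) = (b == a) := by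
  by_cases h : a = b
  · simp [h]
  · have h2 : ¬ b = a := fun e => h e.symm
    simp [h, h2]

lemma foldl_scanP_row (candies : List (List String)) (n i : Int) (s : Int × Int) :
    (PySem.List.pyRange 1 n 1).foldl (fun (s : Int × Int) j =>
      let count := if pvGetCell (pvGetRow candies i) j == pvGetCell (pvGetRow candies i) (j-1) then s.1 + 1 else 1
      (count, if s.2 < count then count else s.2)) s
      = pvScanP (pvGetCell (pvGetRow candies i) 0) s
          ((PySem.List.pyRange 1 n 1).map (fun j => pvGetCell (pvGetRow candies i) j)) := by
  have h := foldl_scanP (fun j => pvGetCell (pvGetRow candies i) j) n 1 s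
  rw [show (1:Int) - 1 = 0 by norm_num] at h
  exact h

lemma foldl_scanP_col (candies : List (List String)) (n i : Int) (s : Int × Int) :
    (PySem.List.pyRange 1 n 1).foldl (fun (s : Int × Int) j =>
      let count := if pvGetCell (pvGetRow candies (j-1)) i == pvGetCell (pvGetRow candies j) i then s.1 + 1 else 1
      (count, if s.2 < count then count else s.2)) s
      = pvScanP (pvGetCell (pvGetRow candies 0) i) s
          ((PySem.List.pyRange 1 n 1).map (fun j => pvGetCell (pvGetRow candies j) i)) := by
  have hcomm : (fun (s : Int × Int) (j : Int) =>
      let count := if pvGetCell (pvGetRow candies (j-1)) i == pvGetCell (pvGetRow candies j) i then s.1 + 1 else 1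
      (count, if s.2 < count then count else s.2))
    = (fun (s : Int × Int) (j : Int) =>
      let count := if pvGetCell (pvGetRow candies j) i == pvGetCell (pvGetRow candies (j-1)) i then s.1 + 1 else 1
      (count, if s.2 < count then count else s.2)) := by
    funext s j
    rw [beq_swap]
  rw [hcomm]
  have h := foldl_scanP (fun j => pvGetCell (pvGetRow candies j) i) n 1 s
  rw [show (1:Int) - 1 = 0 by norm_num] at h
  exact h

-- map of the accessor over range(a, n) is the concrete sub-line
lemma map_range_get_aux {α β : Type} (l : List α) (d : α) (F : α → β) (n : Int) (h : n ≤ (l.length : Int)) :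
    ∀ (k : Nat) (a : Nat), (n - a).toNat ≤ k →
      (PySem.List.pyRange (a : Int) n 1).map (fun j => F ((PySem.List.pyGet? l j).getD d))
        = ((l.take n.toNat).drop a).map F := by
  intro k
  induction k with
  | zero =>
    intro a ha
    rw [PySem.List.pyRange_one_eq_nil (by omega), List.drop_eq_nil_of_le]
    · simp
    · simp; omega
  | succ k ihk =>
    intro a ha
    by_cases hab : (a : Int) < n
    · rw [PySem.List.pyRange_one_cons hab]
      have ha' : ((a : Int) + 1) = ((a + 1 : Nat) : Int) := by push_cast; ring
      rw [List.map_cons, ha', ihk (a+1) (by omega)]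
      have hlt : a < (l.take n.toNat).length := by simp; omega
      rw [List.drop_eq_getElem_cons hlt, List.map_cons]
      congr 1
      rw [List.getElem_take]
      rw [PySem.List.pyGet?_natCast, List.getElem?_eq_getElem (by omega)]
      rfl
    · rw [PySem.List.pyRange_one_eq_nil (by omega), List.drop_eq_nil_of_le]
      · simp
      · simp; omega

lemma map_range_get {α β : Type} (l : List α) (d : α) (F : α → β) (n : Int) (h : n ≤ (l.length : Int))
    (a : Nat) : (PySem.List.pyRange (a : Int) n 1).map (fun j => F ((PySem.List.pyGet? l j).getD d))
      = ((l.take n.toNat).drop a).map F :=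
  map_range_get_aux l d F n h (n - a).toNat a le_rfl

lemma map_row (row : List String) (n : Int) (h : n ≤ (row.length : Int)) :
    (PySem.List.pyRange 1 n 1).map (fun j => pvGetCell row j) = (row.take n.toNat).drop 1 := by
  have h1 := map_range_get row "" id n h 1
  norm_num at h1
  simpa [pvGetCell] using h1

lemma map_col (candies : List (List String)) (n i : Int) (h : n ≤ (candies.length : Int)) :
    (PySem.List.pyRange 1 n 1).map (fun j => pvGetCell (pvGetRow candies j) i)
      = ((candies.take n.toNat).drop 1).map (fun r => pvGetCell r i) := by
  have h1 := map_range_get candies [] (fun r => pvGetCell r i) n h 1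
  norm_num at h1
  simpa [pvGetRow] using h1

lemma pyZipStarGo_rect (L : Nat) : ∀ (g : List (List String)), g ≠ [] →
    (∀ r ∈ g, r.length = L) →
    pyZipStarGo L g = (List.range L).map (fun j => g.map (fun r => r.getD j "")) := by
  induction L with
  | zero => intro g hg hL; simp [pyZipStarGo]
  | succ L ih =>
    intro g hg hL
    rw [pyZipStarGo]
    rw [if_neg]
    · rw [ih (g.map (·.tail)) (by simpa using hg)]
      · rw [List.range_succ_eq_map]
        simp only [List.map_cons, List.map_map]
        congr 1
        · apply List.map_congr_left
          intro r hr
          have := hL r hr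
          cases r with
          | nil => simp at this
          | cons x t => simp
        · apply List.map_congr_left
          intro j hj
          simp only [Function.comp]
          apply List.map_congr_left
          intro r hr
          have := hL r hr
          cases r with
          | nil => simp at this
          | cons x t => simp
      · intro r hr
        simp only [List.mem_map] at hr
        obtain ⟨r0, hr0, rfl⟩ := hr
        have := hL r0 hr0
        simp [this]
    · simp only [Bool.or_eq_true, not_or]
      constructor
      · simpa [List.isEmpty_iff] using hg
      · simp only [List.any_eq_true, not_exists]
        intro r
        rintro ⟨hr, hre⟩
        have := hL r hr
        simp [List.isEmpty_iff] at hre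
        simp [hre] at this

-- row-major interleaving of the row lines and column lines, in A's visiting order
def pvInterleave {α : Type} : List α → List α → List α
  | [], ys => ys
  | x :: xs, ys => x :: pvInterleave ys xs
termination_by xs ys => xs.length + ys.length
decreasing_by simp only [List.length_cons]; omega

lemma pvInterleave_perm {α : Type} : ∀ (xs ys : List α), (pvInterleave xs ys).Perm (xs ++ ys) := by
  intro xs ys
  induction xs, ys using pvInterleave.induct with
  | case1 ys => simp [pvInterleave]
  | case2 x xs ys ih =>
    rw [pvInterleave]
    refine List.Perm.trans (ih.cons x) ?_
    exact List.perm_append_comm.cons x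

-- helper facts about A's grid under Pre_
lemma getRow_mem (candies : List (List String)) (n i : Int) (hlen : n ≤ (candies.length : Int))
    (hi0 : 0 ≤ i) (hin : i < n) : pvGetRow candies i ∈ candies.take n.toNat := by
  have hi : i.toNat < candies.length := by omega
  have : pvGetRow candies i = candies[i.toNat] := by
    rw [pvGetRow, PySem.List.pyGet?_eq_some_getElem candies hi0 (by omega)]
    rfl
  rw [this]
  have ht : (candies.take n.toNat)[i.toNat]'(by simp; omega) = candies[i.toNat] := List.getElem_take ..
  rw [← ht]
  exact List.getElem_mem _

-- the body of A's outer loop evaluated: max over the row line and the column line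
lemma step_eval (candies : List (List String)) (n : Int) (hn : 0 < n)
    (hlen : n ≤ (candies.length : Int))
    (hrow : ∀ row ∈ candies.take n.toNat, n ≤ (row.length : Int))
    (i : Int) (hi0 : 0 ≤ i) (hin : i < n) (m : Int) (hm : 1 ≤ m) :
    (let s1 := (PySem.List.pyRange 1 n 1).foldl (fun (s : Int × Int) j =>
        let count := if pvGetCell (pvGetRow candies i) j == pvGetCell (pvGetRow candies i) (j-1) then s.1 + 1 else 1
        (count, if s.2 < count then count else s.2)) (1, m)
     let s2 := (PySem.List.pyRange 1 n 1).foldl (fun (s : Int × Int) j =>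
        let count := if pvGetCell (pvGetRow candies (j-1)) i == pvGetCell (pvGetRow candies j) i then s.1 + 1 else 1
        (count, if s.2 < count then count else s.2)) (1, s1.2)
     s2.2)
      = max (max m (pvS (pvRowl candies n i))) (pvS (pvColl candies n i)) := by
  have hrl : n ≤ ((pvGetRow candies i).length : Int) :=
    hrow _ (getRow_mem candies n i hlen hi0 hin)
  have hcne : candies.length ≠ 0 := by omega
  -- the row line is nonempty
  have hlrlen : (pvRowl candies n i).length = n.toNat := by
    simp [pvRowl]; omega
  obtain ⟨x, rest, hxr⟩ : ∃ x rest, pvRowl candies n i = x :: rest := by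
    cases hr : pvRowl candies n i with
    | nil => rw [hr] at hlrlen; simp at hlrlen; omega
    | cons a b => exact ⟨a, b, rfl⟩
  have hxr' : (pvGetRow candies i).take n.toNat = x :: rest := hxr
  -- the column line is nonempty
  have hclen : (pvColl candies n i).length = n.toNat := by
    simp [pvColl]; omega
  obtain ⟨y, crest, hyc⟩ : ∃ y crest, pvColl candies n i = y :: crest := by
    cases hc : pvColl candies n i with
    | nil => rw [hc] at hclen; simp at hclen; omega
    | cons a b => exact ⟨a, b, rfl⟩
  have hyc' : (candies.take n.toNat).map (fun r => pvGetCell r i) = y :: crest := hyc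
  have hx : pvGetCell (pvGetRow candies i) 0 = x := by
    have h0 := congrArg (fun l => l[0]?) hxr'
    simp only [List.getElem?_take_of_lt (show 0 < n.toNat by omega), List.getElem?_cons_zero] at h0
    rw [pvGetCell, PySem.List.pyGet?_zero, h0]
    rfl
  have hy : pvGetCell (pvGetRow candies 0) i = y := by
    have h0 := congrArg (fun l => l[0]?) hyc'
    simp only [List.getElem?_map, List.getElem?_take_of_lt (show 0 < n.toNat by omega),
      List.getElem?_cons_zero] at h0
    have hc0 : PySem.List.pyGet? candies 0 = candies[0]? := by
      rw [PySem.List.pyGet?_zero]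
    cases hcand : candies with
    | nil => simp [hcand] at hcne
    | cons c0 ct =>
      rw [hcand] at h0
      simp only [List.getElem?_cons_zero, Option.map_some] at h0
      rw [pvGetRow, PySem.List.pyGet?_zero_cons]
      simpa using h0
  have hmaprow : (PySem.List.pyRange 1 n 1).map (fun j => pvGetCell (pvGetRow candies i) j) = rest := by
    rw [map_row _ n hrl, hxr']
    rfl
  have hmapcol : (PySem.List.pyRange 1 n 1).map (fun j => pvGetCell (pvGetRow candies j) i) = crest := by
    rw [map_col candies n i hlen]
    have h1 := congrArg (List.drop 1) hyc'
    rw [← List.map_drop] at h1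
    simpa using h1
  simp only [foldl_scanP_row, foldl_scanP_col, hx, hy, hmaprow, hmapcol]
  have e1 := scanP_snd rest x 1 m (by omega) hm
  rw [e1]
  have e2 := scanP_snd crest y 1
    (max m (max (1 + (altRunLen x rest : Int)) (pvS (rest.drop (altRunLen x rest)))))
    (by omega) (le_trans hm (le_max_left _ _))
  rw [e2]
  rw [hxr, hyc, pvS, pvS]
  omega

-- A's outer fold over range(n) is the max-fold over the interleaved line list
lemma A_fold_aux (candies : List (List String)) (n : Int) (hn : 0 < n)
    (hlen : n ≤ (candies.length : Int))
    (hrow : ∀ row ∈ candies.take n.toNat, n ≤ (row.length : Int)) :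
    ∀ (k : Nat) (a : Nat), (n - a).toNat ≤ k → ∀ (m : Int), 1 ≤ m →
    (PySem.List.pyRange (a : Int) n 1).foldl (fun max_count i =>
      let s1 := (PySem.List.pyRange 1 n 1).foldl (fun (s : Int × Int) j =>
        let count := if pvGetCell (pvGetRow candies i) j == pvGetCell (pvGetRow candies i) (j-1) then s.1 + 1 else 1
        (count, if s.2 < count then count else s.2)) (1, max_count)
      let s2 := (PySem.List.pyRange 1 n 1).foldl (fun (s : Int × Int) j =>
        let count := if pvGetCell (pvGetRow candies (j-1)) i == pvGetCell (pvGetRow candies j) i then s.1 + 1 else 1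
        (count, if s.2 < count then count else s.2)) (1, s1.2)
      s2.2) m
      = (pvInterleave (((List.range n.toNat).map (fun (j : Nat) => pvRowl candies n (j : Int))).drop a)
          (((List.range n.toNat).map (fun (j : Nat) => pvColl candies n (j : Int))).drop a)).foldl
          (fun b l => max b (pvS l)) m := by
  intro k
  induction k with
  | zero =>
    intro a ha m hm
    have hna : n.toNat ≤ a := by omega
    rw [show PySem.List.pyRange (a : Int) n 1 = [] from PySem.List.pyRange_one_eq_nil (by omega)]
    rw [List.drop_eq_nil_of_le (by simp only [List.length_map, List.length_range]; exact hna),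
      List.drop_eq_nil_of_le (by simp only [List.length_map, List.length_range]; exact hna)]
    rw [pvInterleave]
    rfl
  | succ k ihk =>
    intro a ha m hm
    by_cases hab : (a : Int) < n
    · rw [PySem.List.pyRange_one_cons hab]
      simp only [List.foldl_cons]
      have han : a < n.toNat := by omega
      have hdrow : ((List.range n.toNat).map (fun (j : Nat) => pvRowl candies n (j : Int))).drop a
          = pvRowl candies n (a : Int)
            :: (((List.range n.toNat).map (fun (j : Nat) => pvRowl candies n (j : Int))).drop (a+1)) := by
        rw [List.drop_eq_getElem_cons (by simpa using han)]
        congr 1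
        rw [List.getElem_map, List.getElem_range]
      have hdcol : ((List.range n.toNat).map (fun (j : Nat) => pvColl candies n (j : Int))).drop a
          = pvColl candies n (a : Int)
            :: (((List.range n.toNat).map (fun (j : Nat) => pvColl candies n (j : Int))).drop (a+1)) := by
        rw [List.drop_eq_getElem_cons (by simpa using han)]
        congr 1
        rw [List.getElem_map, List.getElem_range]
      rw [hdrow, hdcol, pvInterleave, pvInterleave]
      rw [List.foldl_cons, List.foldl_cons]
      have hstep := step_eval candies n hn hlen hrow (a : Int) (by omega) hab m hm
      rw [hstep]
      have ha' : ((a : Int) + 1) = ((a + 1 : Nat) : Int) := by push_cast; ring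
      rw [ha', ihk (a+1) (by omega) _ (by omega)]
    · have hna : n.toNat ≤ a := by omega
      rw [show PySem.List.pyRange (a : Int) n 1 = [] from PySem.List.pyRange_one_eq_nil (by omega)]
      rw [List.drop_eq_nil_of_le (by simp only [List.length_map, List.length_range]; exact hna),
        List.drop_eq_nil_of_le (by simp only [List.length_map, List.length_range]; exact hna)]
      rw [pvInterleave]
      rfl

-- elementwise bridges between A's line lists and B's grid/transpose
lemma getRow_nat (candies : List (List String)) (j : Nat) (hj : j < candies.length) :
    pvGetRow candies (j : Int) = candies[j] := by
  rw [pvGetRow, PySem.List.pyGet?_natCast, List.getElem?_eq_getElem hj]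
  rfl

lemma getCell_nat (r : List String) (j : Nat) (N : Nat) (hjN : j < N) :
    (r.take N).getD j "" = pvGetCell r (j : Int) := by
  rw [pvGetCell, PySem.List.pyGet?_natCast]
  rw [List.getD_eq_getElem?_getD, List.getElem?_take_of_lt hjN]

-- ===== VERDICT (by name: the statement is the Claim_ definition above) =====
theorem count_edible_spec : Claim_equal_count_edible := by
  intro candies n _hdom hpre
  obtain ⟨hlen, hrow⟩ := hpre
  unfold Spec_count_edible
  by_cases hn : 0 < n
  case neg =>
    rw [count_edible, count_edible_alt]
    rw [show PySem.List.pyRange 0 n 1 = [] from PySem.List.pyRange_one_eq_nil (by omega)]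
    rfl
  case pos =>
    set N := n.toNat with hNdef
    have hNlen : N ≤ candies.length := by omega
    -- the canonical row lines
    set rowsC := (candies.take N).map (fun r => r.take N) with hrowsC
    have hrowsLen : rowsC.length = N := by simp [hrowsC]; omega
    have hrect : ∀ r ∈ rowsC, r.length = N := by
      intro r hr
      rw [hrowsC] at hr
      simp only [List.mem_map] at hr
      obtain ⟨r0, hr0, rfl⟩ := hr
      have := hrow r0 hr0
      simp; omega
    -- A's row/column line lists coincide with rowsC and the transposed lines
    have hR : (List.range N).map (fun (j : Nat) => pvRowl candies n (j : Int)) = rowsC := by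
      apply List.ext_getElem
      · simp [hrowsC]; omega
      · intro j h1 h2
        simp only [List.getElem_map, List.getElem_range, hrowsC, List.getElem_take]
        rw [pvRowl, getRow_nat candies j (by simp [hrowsC] at h2; omega)]
    set colsC := (List.range N).map (fun (j : Nat) => pvColl candies n (j : Int)) with hcolsC
    -- B's grid is rowsC
    have hgrid : (PySem.List.pyRange 0 n 1).map
        (fun i => PySem.List.slice (pvGetRow candies i) none (some n)) = rowsC := by
      have h1 := map_range_get candies [] (fun r => PySem.List.slice r none (some n)) n hlen 0
      simp only [Nat.cast_zero, List.drop_zero] at h1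
      have h2 : (fun i => PySem.List.slice (pvGetRow candies i) none (some n))
          = (fun j => PySem.List.slice ((PySem.List.pyGet? candies j).getD []) none (some n)) := rfl
      rw [h2, h1, hrowsC]
      apply List.map_congr_left
      intro r _
      rw [PySem.List.slice_to r (show (0:Int) ≤ n by omega)]
    -- B's transpose is A's column line list
    have hzip : pyZipStar rowsC = colsC := by
      have hne : rowsC ≠ [] := by
        intro h; rw [h] at hrowsLen; simp at hrowsLen; omega
      have hgo : pyZipStar rowsC = pyZipStarGo N rowsC := by
        cases hc : rowsC with
        | nil => exact absurd hc hne
        | cons r t =>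
          have hrl : r.length = N := hrect r (by rw [hc]; exact List.mem_cons_self)
          show pyZipStarGo r.length (r :: t) = pyZipStarGo N (r :: t)
          rw [hrl]
      rw [hgo, pyZipStarGo_rect N rowsC hne hrect, hcolsC]
      apply List.map_congr_left
      intro j hj
      simp only [List.mem_range] at hj
      rw [pvColl, hrowsC, List.map_map]
      apply List.map_congr_left
      intro r hr
      simp only [Function.comp]
      exact getCell_nat r j N hj
    -- evaluate A
    have hA := A_fold_aux candies n hn hlen hrow N 0 (by omega) 1 (by omega)
    simp only [Nat.cast_zero, List.drop_zero] at hA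
    rw [count_edible, hA, hR]
    -- evaluate B
    simp only [count_edible_alt]
    rw [hgrid, hzip]
    rw [foldl_altLineMax (rowsC ++ colsC) 1 (by omega)]
    -- same multiset of lines, max-fold is order-insensitive
    exact @List.Perm.foldl_eq _ _ (fun b l => max b (pvS l)) _ _
      ⟨fun b x y => by omega⟩ (pvInterleave_perm rowsC colsC) 1
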